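-- pv_equiv track=rewrite | github.com/HuaxinLab/onefetch | src/onefetch/adapters/xiaohongshu.py | _extract_balanced_object
-- ===== SOURCE A (Python) =====
-- def _extract_balanced_object(text: str, start: int) -> str | None:
--     depth = 0
--     in_string = False
--     escaped = False
--     for idx in range(start, len(text)):
--         ch = text[idx]
--         if in_string:
--             if escaped:
--                 escaped = False
--             elif ch == "\\":
--                 escaped = True
--             elif ch == '"':
--                 in_string = False
--             continue
--         if ch == '"':
--             in_string = True
--         elif ch == "{":
--             depth += 1
--         elif ch == "}":
--             depth -= 1
--             if depth == 0:
--                 return text[start : idx + 1]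
--     return None
-- ===== SOURCE B (Python) =====
-- def _extract_balanced_object(text: str, start: int) -> str | None:
--     n = len(text)
--     # pass 1: collect the structural braces (those outside string literals)
--     braces = []
--     i = start
--     while i < n:
--         c = text[i]
--         if c == '"':
--             i += 1
--             while i < n and text[i] != '"':
--                 i += 2 if text[i] == '\\' else 1
--             i += 1
--         else:
--             if c in '{}':
--                 braces.append((i, c))
--             i += 1
--     # pass 2: depth scan over the structural braces only
--     depth = 0
--     for pos, c in braces:
--         depth += 1 if c == '{' else -1
--         if c == '}' and depth == 0:
--             return text[start:pos + 1]
--     return None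
-- ===== Notes on version B (the rewrite author's own statement) =====
-- stated objective: alternative
-- what changed: Replaced A's single flag-driven scan by two staged passes: pass 1 collects an intermediate list of (position, brace) pairs for braces outside string literals (skipping each literal wholesale, jumping two past a backslash), and pass 2 runs the depth counter over that brace list alone.
import Mathlib
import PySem

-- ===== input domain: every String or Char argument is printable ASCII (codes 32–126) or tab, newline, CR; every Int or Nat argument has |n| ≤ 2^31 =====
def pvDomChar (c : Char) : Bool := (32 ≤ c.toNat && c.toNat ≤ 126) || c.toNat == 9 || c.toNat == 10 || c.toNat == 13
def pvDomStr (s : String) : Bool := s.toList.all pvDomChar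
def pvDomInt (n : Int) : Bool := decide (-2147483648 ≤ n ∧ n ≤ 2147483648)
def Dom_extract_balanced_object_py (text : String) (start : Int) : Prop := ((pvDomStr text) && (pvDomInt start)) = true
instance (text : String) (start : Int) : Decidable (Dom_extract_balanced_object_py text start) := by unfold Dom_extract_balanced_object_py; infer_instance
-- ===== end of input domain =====

-- B replaces A's flag-driven single scan by two staged passes: pass 1 builds the list of
-- structural braces (position, char) outside string literals, pass 2 runs the depth counter
-- over that list (objective: alternative decomposition, same cost; not faster).
-- Both ports read text[idx] via pyGetD (default ' '): inside Pre_ (start ≥ -len) every index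
-- the loops reach is in range, so the default is never used.  Loops are totalized with a
-- fuel counter equal to the number of remaining positions.

-- ===== PORT A =====
-- 'for idx in range(start, len(text))' with state (depth, in_string, escaped), one fuel per step
def goA (cs : List Char) (start n : Int) : Nat → Int → Int → Bool → Bool → Option (List Char)
  | 0, _, _, _, _ => none
  | fuel+1, idx, depth, instr, esc =>
    if idx < n then
      let ch := PySem.List.pyGetD cs idx ' '
      if instr then
        if esc then goA cs start n fuel (idx+1) depth true false
        else if ch = '\\' then goA cs start n fuel (idx+1) depth true true
        else if ch = '"' then goA cs start n fuel (idx+1) depth false false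
        else goA cs start n fuel (idx+1) depth true false
      else if ch = '"' then goA cs start n fuel (idx+1) depth true esc
      else if ch = '{' then goA cs start n fuel (idx+1) (depth+1) instr esc
      else if ch = '}' then
        if depth - 1 = 0 then some (PySem.List.slice cs (some start) (some (idx+1)))
        else goA cs start n fuel (idx+1) (depth-1) instr esc
      else goA cs start n fuel (idx+1) depth instr esc
    else none

def extract_balanced_object_py (text : String) (start : Int) : Option String :=
  let cs := text.toList
  let n : Int := cs.length
  (goA cs start n (n - start).toNat start 0 false false).map String.ofList

-- ===== PORT B =====
-- inner 'while i < n and text[i] != '"'' of pass 1 (advance through a string literal)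
def wloopB (cs : List Char) (n : Int) : Nat → Int → Int
  | 0, i => i
  | fuel+1, i =>
    if i < n then
      let c := PySem.List.pyGetD cs i ' '
      if c = '"' then i
      else wloopB cs n fuel (i + (if c = '\\' then 2 else 1))
    else i

-- pass 1: collect (position, brace) for braces outside string literals
def collectB (cs : List Char) (n : Int) : Nat → Int → List (Int × Char)
  | 0, _ => []
  | fuel+1, i =>
    if i < n then
      let c := PySem.List.pyGetD cs i ' '
      if c = '"' then collectB cs n fuel (wloopB cs n fuel (i+1) + 1)
      else if c = '{' ∨ c = '}' then (i, c) :: collectB cs n fuel (i+1)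
      else collectB cs n fuel (i+1)
    else []

-- pass 2: depth scan over the collected braces, returning the closing position
def pass2B : List (Int × Char) → Int → Option Int
  | [], _ => none
  | (pos, c) :: rest, depth =>
    let d := depth + (if c = '{' then 1 else -1)
    if c = '}' then (if d = 0 then some pos else pass2B rest d) else pass2B rest d

def extract_balanced_object_py_alt (text : String) (start : Int) : Option String :=
  let cs := text.toList
  let n : Int := cs.length
  (pass2B (collectB cs n (n - start).toNat start) 0).map
    (fun p => String.ofList (PySem.List.slice cs (some start) (some (p+1))))

-- ===== PRECONDITION & SPEC =====
-- Pre_ excludes start < -len(text): there Python A raises IndexError on its first text[idx].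
def Pre_extract_balanced_object_py (text : String) (start : Int) : Prop :=
  -(PySem.Str.len text) ≤ start
instance (text : String) (start : Int) : Decidable (Pre_extract_balanced_object_py text start) := by
  unfold Pre_extract_balanced_object_py; infer_instance
def pvWitness_extract_balanced_object_py : String × Int := ("{\"a\": 1}", 0)

def Spec_extract_balanced_object_py (text : String) (start : Int) (out : Option String) : Prop := out = extract_balanced_object_py_alt text start
instance (text : String) (start : Int) (out : Option String) : Decidable (Spec_extract_balanced_object_py text start out) := by unfold Spec_extract_balanced_object_py; infer_instance

-- ===== CLAIM (what is proved, stated in full; the proofs are below) =====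
def Claim_equal_extract_balanced_object_py : Prop := ∀ (text : String) (start : Int), Dom_extract_balanced_object_py text start → Pre_extract_balanced_object_py text start → Spec_extract_balanced_object_py text start (extract_balanced_object_py text start)

-- ===== LEMMAS AND PROOFS =====

theorem goA_none (cs : List Char) (start n : Int) (fa : Nat) (idx depth : Int) (instr esc : Bool)
    (h : ¬ idx < n) : goA cs start n fa idx depth instr esc = none := by
  cases fa <;> simp [goA, h]

theorem wloopB_stop (cs : List Char) (n : Int) (fw : Nat) (i : Int)
    (h : ¬ i < n) : wloopB cs n fw i = i := by
  cases fw <;> simp [wloopB, h]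

theorem collectB_nil (cs : List Char) (n : Int) (fc : Nat) (i : Int)
    (h : ¬ i < n) : collectB cs n fc i = [] := by
  cases fc <;> simp [collectB, h]

-- core invariant, by induction on a bound k on the remaining length: with enough fuel,
-- (1) outside a string A's scan equals pass2 over the braces collected from idx, and
-- (2) from inside a string (escaped = false) A's scan equals pass2 over the braces
--     collected after the inner while-loop consumes the rest of the literal.
theorem goA_eq_B (cs : List Char) (start n : Int) :
    ∀ (k : Nat) (idx depth : Int) (fa : Nat),
      (n - idx).toNat ≤ k → (n - idx).toNat ≤ fa →
      ((∀ fc : Nat, (n - idx).toNat ≤ fc →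
          goA cs start n fa idx depth false false
            = (pass2B (collectB cs n fc idx) depth).map
                (fun p => PySem.List.slice cs (some start) (some (p+1)))) ∧
       (∀ (fw fc : Nat), (n - idx).toNat ≤ fw → (n - idx).toNat ≤ fc →
          goA cs start n fa idx depth true false
            = (pass2B (collectB cs n fc (wloopB cs n fw idx + 1)) depth).map
                (fun p => PySem.List.slice cs (some start) (some (p+1))))) := by
  intro k
  induction k with
  | zero =>
    intro idx depth fa hk _
    have hge : ¬ idx < n := by omega
    refine ⟨?_, ?_⟩
    · intro fc _
      rw [goA_none _ _ _ _ _ _ _ _ hge, collectB_nil _ _ _ _ hge]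
      rfl
    · intro fw fc _ _
      rw [goA_none _ _ _ _ _ _ _ _ hge, wloopB_stop _ _ _ _ hge,
          collectB_nil _ _ _ _ (show ¬ idx + 1 < n by omega)]
      rfl
  | succ k ih =>
    intro idx depth fa hk hfa
    by_cases hlt : idx < n
    · obtain ⟨fa', rfl⟩ : ∃ m, fa = m + 1 := ⟨fa - 1, by omega⟩
      refine ⟨?_, ?_⟩
      · -- part 1: not in a string
        intro fc hfc
        obtain ⟨fc', rfl⟩ : ∃ m, fc = m + 1 := ⟨fc - 1, by omega⟩
        rw [goA, collectB]
        simp only [hlt, if_true, Bool.false_eq_true, if_false]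
        by_cases h1 : PySem.List.pyGetD cs idx ' ' = '"'
        · rw [h1]
          simp only [Char.reduceEq, reduceIte]
          exact (ih (idx+1) depth fa' (by omega) (by omega)).2 fc' fc' (by omega) (by omega)
        · by_cases h2 : PySem.List.pyGetD cs idx ' ' = '{'
          · rw [h2]
            simp only [Char.reduceEq, or_false, if_true, if_false, pass2B]
            exact (ih (idx+1) (depth+1) fa' (by omega) (by omega)).1 fc' (by omega)
          · by_cases h3 : PySem.List.pyGetD cs idx ' ' = '}'
            · rw [h3]
              simp only [Char.reduceEq, false_or, if_true, if_false, pass2B]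
              by_cases h4 : depth - 1 = 0
              · have hd : depth + -1 = 0 := by omega
                rw [if_pos h4, if_pos hd]
                rfl
              · have hd : ¬ depth + -1 = 0 := by omega
                rw [if_neg h4, if_neg hd]
                have : depth + -1 = depth - 1 := by omega
                rw [this]
                exact (ih (idx+1) (depth-1) fa' (by omega) (by omega)).1 fc' (by omega)
            · rw [if_neg h1, if_neg h2, if_neg h3, if_neg h1,
                  if_neg (show ¬ (PySem.List.pyGetD cs idx ' ' = '{' ∨
                                  PySem.List.pyGetD cs idx ' ' = '}') by tauto)]
              exact (ih (idx+1) depth fa' (by omega) (by omega)).1 fc' (by omega)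
      · -- part 2: inside a string, not escaped
        intro fw fc hfw hfc
        obtain ⟨fw', rfl⟩ : ∃ m, fw = m + 1 := ⟨fw - 1, by omega⟩
        rw [goA, wloopB]
        simp only [hlt, if_true, Bool.false_eq_true, if_false]
        by_cases h1 : PySem.List.pyGetD cs idx ' ' = '\\'
        · -- A consumes the next char with escaped = true; B's inner loop jumps by 2
          rw [h1]
          simp only [Char.reduceEq, reduceIte]
          by_cases h2 : idx + 1 < n
          · obtain ⟨fa'', rfl⟩ : ∃ m, fa' = m + 1 := ⟨fa' - 1, by omega⟩
            rw [goA]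
            simp only [h2, if_true]
            have heq : idx + 1 + 1 = idx + 2 := by ring
            rw [heq]
            exact (ih (idx+2) depth fa'' (by omega) (by omega)).2 fw' fc (by omega) (by omega)
          · rw [goA_none _ _ _ _ _ _ _ _ h2,
                wloopB_stop _ _ _ _ (show ¬ idx + 2 < n by omega),
                collectB_nil _ _ _ _ (show ¬ idx + 2 + 1 < n by omega)]
            rfl
        · by_cases h2 : PySem.List.pyGetD cs idx ' ' = '"'
          · rw [h2]
            simp only [Char.reduceEq, reduceIte]
            exact (ih (idx+1) depth fa' (by omega) (by omega)).1 fc (by omega)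
          · rw [if_neg h1, if_neg h2, if_neg h2,
                if_neg (show ¬ PySem.List.pyGetD cs idx ' ' = '\\' from h1)]
            exact (ih (idx+1) depth fa' (by omega) (by omega)).2 fw' fc (by omega) (by omega)
    · refine ⟨?_, ?_⟩
      · intro fc _
        rw [goA_none _ _ _ _ _ _ _ _ hlt, collectB_nil _ _ _ _ hlt]
        rfl
      · intro fw fc _ _
        rw [goA_none _ _ _ _ _ _ _ _ hlt, wloopB_stop _ _ _ _ hlt,
            collectB_nil _ _ _ _ (show ¬ idx + 1 < n by omega)]
        rfl

-- ===== VERDICT (by name: the statement is the Claim_ definition above) =====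
theorem extract_balanced_object_py_spec : Claim_equal_extract_balanced_object_py := by
  intro text start _ _
  unfold Spec_extract_balanced_object_py extract_balanced_object_py extract_balanced_object_py_alt
  simp only []
  rw [(goA_eq_B text.toList start (text.toList.length : Int)
        ((text.toList.length : Int) - start).toNat start 0
        ((text.toList.length : Int) - start).toNat
        (le_refl _) (le_refl _)).1 _ (le_refl _)]
  simp [Option.map_map, Function.comp_def]
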